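-- PySem.lean, part 3 of 3 (source lines 289-410 of 563; lines 411-563 are in no part): max/min without a key as a running fold, sorted under an injective key, maxD/minD with a default.
-- An excerpt: the file's own header and imports are repeated below, the enclosing namespaces are reopened, and the other parts are separate documents.
import Mathlib.Order.Defs.LinearOrder
import PySemCore

/-!
# PySem — the import surface: PySemCore (every Python-exact primitive and bridge lemma; core-Lean only, kernel-transparent)
# plus the order-theoretic SPEC lemmas of sorted / min? / max?, which need Mathlib's LinearOrder and so live here

PySemCore is core-only (so it compiles in seconds and stays kernel-transparent); the facts a port's PROOF usually needs about
sorting and extrema are stated here under Mathlib's `LinearOrder` on the key type: the output of `sorted` is ordered by key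
(and a permutation — `PySem.List.sorted_perm`), and `max?`/`min?` return an element whose key bounds every element's key.
Cite these by name; do not re-prove them.
-/

namespace PySem.List
variable {α κ : Type} [LinearOrder κ]

/-! ### Lemma pack 4 — max/min without a key as a running fold, sorted under an injective key, positional monotonicity of sorted -/

/-- max(xs) / min(xs) WITHOUT a key on a non-empty list is the running max / min (the loop a port writes). -/
theorem max?_id_cons (x : κ) (t : _root_.List κ) : max? (x :: t) (fun y => y) = some (t.foldl max x) := by
  unfold max?
  simp only [_root_.List.foldl_cons]
  suffices H : ∀ (acc : κ), t.foldl (fun acc x => match acc with | none => some x | some m => if m < x then some x else some m) (some acc)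
      = some (t.foldl max acc) from H x
  induction t with
  | nil => intro acc; rfl
  | cons y u ih =>
    intro acc; simp only [_root_.List.foldl_cons]
    by_cases h : acc < y
    · simp only [h, ↓reduceIte, ih, max_eq_right_of_lt h]
    · simp only [h, ↓reduceIte, ih, max_eq_left (not_lt.mp h)]
theorem min?_id_cons (x : κ) (t : _root_.List κ) : min? (x :: t) (fun y => y) = some (t.foldl min x) := by
  unfold min?
  simp only [_root_.List.foldl_cons]
  suffices H : ∀ (acc : κ), t.foldl (fun acc x => match acc with | none => some x | some m => if x < m then some x else some m) (some acc)
      = some (t.foldl min acc) from H x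
  induction t with
  | nil => intro acc; rfl
  | cons y u ih =>
    intro acc; simp only [_root_.List.foldl_cons]
    by_cases h : y < acc
    · simp only [h, ↓reduceIte, ih, min_eq_right_of_lt h]
    · simp only [h, ↓reduceIte, ih, min_eq_left (not_lt.mp h)]
/-- a running max bounds its start and every term; a running min is bounded by them. -/
theorem le_foldl_max (t : _root_.List κ) (a : κ) : a ≤ t.foldl max a ∧ ∀ y ∈ t, y ≤ t.foldl max a := by
  induction t generalizing a with
  | nil => simp
  | cons y u ih =>
    simp only [_root_.List.foldl_cons, _root_.List.mem_cons]
    have ⟨h1, h2⟩ := ih (max a y)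
    exact ⟨le_trans (le_max_left _ _) h1, fun z hz => hz.elim (fun e => by subst e; exact le_trans (le_max_right _ _) h1) (h2 z)⟩
theorem foldl_min_le (t : _root_.List κ) (a : κ) : t.foldl min a ≤ a ∧ ∀ y ∈ t, t.foldl min a ≤ y := by
  induction t generalizing a with
  | nil => simp
  | cons y u ih =>
    simp only [_root_.List.foldl_cons, _root_.List.mem_cons]
    have ⟨h1, h2⟩ := ih (min a y)
    exact ⟨le_trans h1 (min_le_left _ _), fun z hz => hz.elim (fun e => by subst e; exact le_trans h1 (min_le_right _ _)) (h2 z)⟩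
theorem foldl_max_mem (t : _root_.List κ) (a : κ) : t.foldl max a = a ∨ t.foldl max a ∈ t := by
  induction t generalizing a with
  | nil => simp
  | cons y u ih =>
    simp only [_root_.List.foldl_cons, _root_.List.mem_cons]
    rcases ih (max a y) with h | h
    · rw [h]; by_cases hay : a ≤ y
      · simp [max_eq_right hay]
      · simp [max_eq_left (le_of_not_ge hay)]
    · exact Or.inr (Or.inr h)
theorem foldl_min_mem (t : _root_.List κ) (a : κ) : t.foldl min a = a ∨ t.foldl min a ∈ t := by
  induction t generalizing a with
  | nil => simp
  | cons y u ih =>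
    simp only [_root_.List.foldl_cons, _root_.List.mem_cons]
    rcases ih (min a y) with h | h
    · rw [h]; by_cases hay : a ≤ y
      · simp [min_eq_left hay]
      · simp [min_eq_right (le_of_not_ge hay)]
    · exact Or.inr (Or.inr h)

/-- two ≤-by-key-ordered rearrangements of each other under an INJECTIVE key agree — so sorted(xs, key) = sorted(ys, key) for xs ~ ys. -/
theorem eq_of_perm_of_pairwise_le_of_injective {l₁ l₂ : _root_.List α} (key : α → κ) (hinj : Function.Injective key) (hp : l₁.Perm l₂)
    (h₁ : l₁.Pairwise (fun a b => key a ≤ key b)) (h₂ : l₂.Pairwise (fun a b => key a ≤ key b)) : l₁ = l₂ := by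
  induction l₂ generalizing l₁ with
  | nil => exact hp.eq_nil
  | cons b t ih =>
    cases l₁ with
    | nil => exact absurd hp.symm.eq_nil (by simp)
    | cons a s =>
      rw [_root_.List.pairwise_cons] at h₁ h₂
      have hab : a = b := by
        by_contra hne
        have ha : a ∈ t := by simpa [hne] using hp.subset (_root_.List.mem_cons_self)
        have hb : b ∈ s := by simpa [Ne.symm hne] using hp.symm.subset (_root_.List.mem_cons_self)
        exact hne (hinj (le_antisymm (h₁.1 b hb) (h₂.1 a ha)))
      subst hab
      rw [ih (_root_.List.Perm.cons_inv hp) h₁.2 h₂.2]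
theorem sorted_eq_sorted_of_perm (xs ys : _root_.List α) (key : α → κ) (hinj : Function.Injective key) (hp : xs.Perm ys) :
    sorted xs key false = sorted ys key false :=
  eq_of_perm_of_pairwise_le_of_injective key hinj (((sorted_perm xs key false).trans hp).trans (sorted_perm ys key false).symm)
    (sorted_pairwise xs key) (sorted_pairwise ys key)
/-- sorted(xs) == sorted(ys) (no key) exactly for rearrangements. -/
theorem sorted_id_eq_sorted_id_iff_perm (xs ys : _root_.List κ) : sorted xs (fun x => x) false = sorted ys (fun x => x) false ↔ xs.Perm ys :=
  ⟨fun h => ((sorted_perm xs _ false).symm.trans (h ▸ sorted_perm ys _ false)),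
   fun hp => sorted_eq_sorted_of_perm xs ys (fun x => x) (fun _ _ h => h) hp⟩
/-- sorted(xs, key)[p] ≤ sorted(xs, key)[q] by key for p ≤ q (positional monotonicity). -/
theorem key_sorted_getElem_mono (xs : _root_.List α) (key : α → κ) {p q : Nat} (hpq : p ≤ q) (hq : q < (sorted xs key false).length) :
    key ((sorted xs key false)[p]'(by omega)) ≤ key ((sorted xs key false)[q]) := by
  rcases Nat.lt_or_eq_of_le hpq with h | rfl
  · exact _root_.List.pairwise_iff_getElem.mp (sorted_pairwise xs key) p q (by omega) hq h
  · exact le_refl _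
theorem sorted_id_getElem_mono (xs : _root_.List κ) {p q : Nat} (hpq : p ≤ q) (hq : q < (sorted xs (fun x => x) false).length) :
    (sorted xs (fun x => x) false)[p]'(by omega) ≤ (sorted xs (fun x => x) false)[q] :=
  key_sorted_getElem_mono xs (fun x => x) hpq hq

/-! ### Lemma pack 6 — max / min with a default (maxD / minD): the result bounds every element's key; without a key it is the running max / min -/
/-- max(xs, key=key) (list known non-empty; d is never used) bounds every element's key from above. -/
theorem le_key_maxD (xs : _root_.List α) (key : α → κ) (d : α) (h : xs ≠ []) : ∀ y ∈ xs, key y ≤ key (maxD xs key d) :=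
  max?_isMax (max?_eq_some_maxD xs key d h)
/-- min(xs, key=key) bounds every element's key from below. -/
theorem key_minD_le (xs : _root_.List α) (key : α → κ) (d : α) (h : xs ≠ []) : ∀ y ∈ xs, key (minD xs key d) ≤ key y :=
  min?_isMin (min?_eq_some_minD xs key d h)
/-- max(xs) WITHOUT a key: every element ≤ it (vacuous on [], so no side condition). -/
theorem le_maxD_id (xs : _root_.List κ) (d : κ) : ∀ y ∈ xs, y ≤ maxD xs (fun x => x) d := by
  by_cases h : xs = []
  · subst h; simp
  · exact max?_isMax (max?_eq_some_maxD xs (fun x => x) d h)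
theorem minD_id_le (xs : _root_.List κ) (d : κ) : ∀ y ∈ xs, minD xs (fun x => x) d ≤ y := by
  by_cases h : xs = []
  · subst h; simp
  · exact min?_isMin (min?_eq_some_minD xs (fun x => x) d h)
/-- max(xs) / min(xs) without a key on a cons is the running max / min (the loop a port writes). -/
theorem maxD_id_cons (x : κ) (t : _root_.List κ) (d : κ) : maxD (x :: t) (fun y => y) d = t.foldl max x := by
  simp [maxD, max?_id_cons]
theorem minD_id_cons (x : κ) (t : _root_.List κ) (d : κ) : minD (x :: t) (fun y => y) d = t.foldl min x := by
  simp [minD, min?_id_cons]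


end PySem.List
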